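-- pv_equiv track=rewrite | github.com/svend4/meta | projects/hexglyph/solan_bit.py | _find_bit_orbit
-- ===== SOURCE A (Python) =====
-- def bit_step(bits: list[int], rule: str) -> list[int]:
--     """Один шаг 1-битного CA.
--
--     Правила идентичны Q6-шагу, но значения = 0/1 (бит-слой).
--     Тороидальные граничные условия.
--     """
--     n = len(bits)
--     if rule == 'xor':
--         return [bits[(i - 1) % n] ^ bits[(i + 1) % n] for i in range(n)]
--     if rule == 'xor3':
--         return [bits[(i - 1) % n] ^ bits[i] ^ bits[(i + 1) % n]
--                 for i in range(n)]
--     if rule == 'and':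
--         return [bits[(i - 1) % n] & bits[(i + 1) % n] for i in range(n)]
--     if rule == 'or':
--         return [bits[(i - 1) % n] | bits[(i + 1) % n] for i in range(n)]
--     raise ValueError(f"Неизвестное правило: {rule!r}")
--
-- def _find_bit_orbit(bits: list[int], rule: str) -> tuple[int, int]:
--     """Floyd-орбита 1-битного CA → (transient, period)."""
--     seen: dict[tuple[int, ...], int] = {}
--     cur = bits[:]
--     t = 0
--     while True:
--         key = tuple(cur)
--         if key in seen:
--             return seen[key], t - seen[key]
--         seen[key] = t
--         cur = bit_step(cur, rule)
--         t += 1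
-- ===== SOURCE B (Python) =====
-- def bit_step(bits: list[int], rule: str) -> list[int]:
--     n = len(bits)
--     if rule == 'xor':
--         return [bits[(i - 1) % n] ^ bits[(i + 1) % n] for i in range(n)]
--     if rule == 'xor3':
--         return [bits[(i - 1) % n] ^ bits[i] ^ bits[(i + 1) % n]
--                 for i in range(n)]
--     if rule == 'and':
--         return [bits[(i - 1) % n] & bits[(i + 1) % n] for i in range(n)]
--     if rule == 'or':
--         return [bits[(i - 1) % n] | bits[(i + 1) % n] for i in range(n)]
--     raise ValueError(f"Неизвестное правило: {rule!r}")
--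
--
-- def _find_bit_orbit(bits: list[int], rule: str) -> tuple[int, int]:
--     """Floyd cycle detection (tortoise/hare), O(1) memory -> (transient, period)."""
--     # Phase 1: find a meeting point inside the cycle.
--     slow = bit_step(bits, rule)
--     fast = bit_step(slow, rule)
--     while slow != fast:
--         slow = bit_step(slow, rule)
--         fast = bit_step(bit_step(fast, rule), rule)
--     # Phase 2: restart one pointer from the start; first coincidence = transient.
--     slow = bits[:]
--     mu = 0
--     while slow != fast:
--         slow = bit_step(slow, rule)
--         fast = bit_step(fast, rule)
--         mu += 1
--     # Phase 3: walk once around the cycle from the first cyclic state = period.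
--     lam = 1
--     cur = bit_step(slow, rule)
--     while cur != slow:
--         cur = bit_step(cur, rule)
--         lam += 1
--     return mu, lam
-- ===== Notes on version B (the rewrite author's own statement) =====
-- stated objective: alternative
-- what changed: Replaces A's growing seen-dictionary (hash and store every visited state, O(orbit) memory) with Floyd tortoise/hare cycle detection: three pointer-chasing phases in O(1) extra memory.
import Mathlib
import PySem

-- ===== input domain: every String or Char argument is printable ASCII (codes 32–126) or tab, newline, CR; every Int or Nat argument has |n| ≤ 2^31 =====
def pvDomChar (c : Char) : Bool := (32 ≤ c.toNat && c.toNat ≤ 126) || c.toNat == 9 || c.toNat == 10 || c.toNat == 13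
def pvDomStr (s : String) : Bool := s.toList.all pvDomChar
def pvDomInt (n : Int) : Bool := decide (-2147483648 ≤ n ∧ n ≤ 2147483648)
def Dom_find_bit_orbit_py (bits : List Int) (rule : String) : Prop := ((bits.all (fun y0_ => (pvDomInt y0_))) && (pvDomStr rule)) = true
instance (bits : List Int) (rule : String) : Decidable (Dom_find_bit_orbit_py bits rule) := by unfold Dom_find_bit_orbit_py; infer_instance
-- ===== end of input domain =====

-- B replaces A's growing seen-dictionary with Floyd tortoise/hare cycle detection (three
-- pointer-chasing phases, O(1) extra memory); equivalence of the RETURN value is proved on Pre_.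

-- ===== PORT A =====
-- shared helper: port of bit_step (both Pythons call the same module helper).
-- The unknown-rule branch raises ValueError in Python (excluded by Pre_); the port returns [] there.
def pvBitStep (bits : List Int) (rule : String) : List Int :=
  let n : Int := bits.length
  if rule = "xor" then
    (PySem.List.pyRange 0 n 1).map (fun i =>
      PySem.Int.bxor (PySem.List.pyGetD bits (PySem.Int.mod (i - 1) n) 0)
        (PySem.List.pyGetD bits (PySem.Int.mod (i + 1) n) 0))
  else if rule = "xor3" then
    (PySem.List.pyRange 0 n 1).map (fun i =>
      PySem.Int.bxor (PySem.Int.bxor (PySem.List.pyGetD bits (PySem.Int.mod (i - 1) n) 0)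
        (PySem.List.pyGetD bits i 0))
        (PySem.List.pyGetD bits (PySem.Int.mod (i + 1) n) 0))
  else if rule = "and" then
    (PySem.List.pyRange 0 n 1).map (fun i =>
      PySem.Int.band (PySem.List.pyGetD bits (PySem.Int.mod (i - 1) n) 0)
        (PySem.List.pyGetD bits (PySem.Int.mod (i + 1) n) 0))
  else if rule = "or" then
    (PySem.List.pyRange 0 n 1).map (fun i =>
      PySem.Int.bor (PySem.List.pyGetD bits (PySem.Int.mod (i - 1) n) 0)
        (PySem.List.pyGetD bits (PySem.Int.mod (i + 1) n) 0))
  else []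

-- A's while-True loop with the seen-dictionary; fuel is only a totality guard
-- (2^len(bits)+1 steps always suffice on Pre_, proved below).
def pvLoopA (rule : String) : Nat → PySem.Dict (List Int) Int → List Int → Int → Int × Int
  | 0, _, _, _ => (0, 0)
  | fuel + 1, seen, cur, t =>
    match seen.get? cur with
    | some s => (s, t - s)
    | none => pvLoopA rule fuel (seen.insert cur t) (pvBitStep cur rule) (t + 1)

def find_bit_orbit_py (bits : List Int) (rule : String) : Int × Int :=
  pvLoopA rule ((2 ^ 33) ^ bits.length + 1) PySem.Dict.empty bits 0

-- ===== PORT B =====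
-- Floyd phase 1: tortoise/hare until they meet (returns the meeting state).
def pvLoop1 (rule : String) : Nat → List Int → List Int → List Int
  | 0, _, fast => fast
  | fuel + 1, slow, fast =>
    if slow = fast then fast
    else pvLoop1 rule fuel (pvBitStep slow rule) (pvBitStep (pvBitStep fast rule) rule)

-- Floyd phase 2: restart from the origin; first coincidence = transient (also returns that state).
def pvLoop2 (rule : String) : Nat → List Int → List Int → Int → Int × List Int
  | 0, slow, _, mu => (mu, slow)
  | fuel + 1, slow, fast, mu =>
    if slow = fast then (mu, slow)
    else pvLoop2 rule fuel (pvBitStep slow rule) (pvBitStep fast rule) (mu + 1)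

-- Floyd phase 3: walk once around the cycle = period.
def pvLoop3 (rule : String) (base : List Int) : Nat → List Int → Int → Int
  | 0, _, lam => lam
  | fuel + 1, cur, lam =>
    if cur = base then lam
    else pvLoop3 rule base fuel (pvBitStep cur rule) (lam + 1)

def find_bit_orbit_py_alt (bits : List Int) (rule : String) : Int × Int :=
  let F := (2 ^ 33) ^ bits.length + 1
  let slow0 := pvBitStep bits rule
  let fast0 := pvBitStep slow0 rule
  let meet := pvLoop1 rule F slow0 fast0
  let ms := pvLoop2 rule F bits meet 0
  let lam := pvLoop3 rule ms.2 F (pvBitStep ms.2 rule) 1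
  (ms.1, lam)

-- ===== PRECONDITION & SPEC =====
-- Pre_ excludes exactly the unknown rules, on which A raises ValueError.
def Pre_find_bit_orbit_py (bits : List Int) (rule : String) : Prop :=
  rule = "xor" ∨ rule = "xor3" ∨ rule = "and" ∨ rule = "or"
instance (bits : List Int) (rule : String) : Decidable (Pre_find_bit_orbit_py bits rule) := by
  unfold Pre_find_bit_orbit_py; infer_instance

def pvWitness_find_bit_orbit_py : List Int × String := ([1, 0, 0], "xor")

def Spec_find_bit_orbit_py (bits : List Int) (rule : String) (out : Int × Int) : Prop := out = find_bit_orbit_py_alt bits rule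
instance (bits : List Int) (rule : String) (out : Int × Int) : Decidable (Spec_find_bit_orbit_py bits rule out) := by unfold Spec_find_bit_orbit_py; infer_instance

-- ===== CLAIM (what is proved, stated in full; the proofs are below) =====
def Claim_equal_find_bit_orbit_py : Prop := ∀ (bits : List Int) (rule : String), Dom_find_bit_orbit_py bits rule → Pre_find_bit_orbit_py bits rule → Spec_find_bit_orbit_py bits rule (find_bit_orbit_py bits rule)

-- ===== LEMMAS AND PROOFS =====

-- the orbit sequence of the CA
def pvSeq (bits : List Int) (rule : String) (t : Nat) : List Int :=
  (fun s => pvBitStep s rule)^[t] bits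

theorem pvSeq_succ (bits : List Int) (rule : String) (t : Nat) :
    pvSeq bits rule (t + 1) = pvBitStep (pvSeq bits rule t) rule := by
  simp [pvSeq, Function.iterate_succ_apply']

-- an integer window closed under Python's bitwise operators
def pvE (v : Int) : Prop := -(2 ^ 32) ≤ v ∧ v < 2 ^ 32

theorem pvBand_E (a b : Int) (ha : pvE a) (hb : pvE b) : pvE (PySem.Int.band a b) := by
  obtain ⟨ha1, ha2⟩ := ha; obtain ⟨hb1, hb2⟩ := hb
  have h1 : a.toNat &&& b.toNat ≤ a.toNat := Nat.and_le_left
  have h2 : a.toNat - (a.toNat &&& (-b - 1).toNat) ≤ a.toNat := Nat.sub_le _ _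
  have h3 : b.toNat - (b.toNat &&& (-a - 1).toNat) ≤ b.toNat := Nat.sub_le _ _
  have h4 : (-a - 1).toNat ||| (-b - 1).toNat < 2 ^ 32 := by
    apply Nat.or_lt_two_pow <;> omega
  simp only [PySem.Int.band, pvE]
  split_ifs <;> omega

theorem pvBor_E (a b : Int) (ha : pvE a) (hb : pvE b) : pvE (PySem.Int.bor a b) := by
  obtain ⟨ha1, ha2⟩ := ha; obtain ⟨hb1, hb2⟩ := hb
  have h1 : a.toNat ||| b.toNat < 2 ^ 32 := by apply Nat.or_lt_two_pow <;> omega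
  have h2 : (-b - 1).toNat - ((-b - 1).toNat &&& a.toNat) ≤ (-b - 1).toNat := Nat.sub_le _ _
  have h3 : (-a - 1).toNat - ((-a - 1).toNat &&& b.toNat) ≤ (-a - 1).toNat := Nat.sub_le _ _
  have h4 : (-a - 1).toNat &&& (-b - 1).toNat ≤ (-a - 1).toNat := Nat.and_le_left
  simp only [PySem.Int.bor, pvE]
  split_ifs <;> omega

theorem pvBxor_E (a b : Int) (ha : pvE a) (hb : pvE b) : pvE (PySem.Int.bxor a b) := by
  obtain ⟨ha1, ha2⟩ := ha; obtain ⟨hb1, hb2⟩ := hb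
  have h1 : a.toNat ^^^ b.toNat < 2 ^ 32 := by apply Nat.xor_lt_two_pow <;> omega
  have h2 : a.toNat ^^^ (-b - 1).toNat < 2 ^ 32 := by apply Nat.xor_lt_two_pow <;> omega
  have h3 : (-a - 1).toNat ^^^ b.toNat < 2 ^ 32 := by apply Nat.xor_lt_two_pow <;> omega
  have h4 : (-a - 1).toNat ^^^ (-b - 1).toNat < 2 ^ 32 := by apply Nat.xor_lt_two_pow <;> omega
  simp only [PySem.Int.bxor, pvE]
  split_ifs <;> omega

-- a well-formed state: right length, entries in the closed window
def pvGood (n : Nat) (s : List Int) : Prop := s.length = n ∧ ∀ x ∈ s, pvE x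

theorem pvBitStep_good (n : Nat) (s : List Int) (rule : String)
    (hr : rule = "xor" ∨ rule = "xor3" ∨ rule = "and" ∨ rule = "or")
    (h : pvGood n s) : pvGood n (pvBitStep s rule) := by
  obtain ⟨hlen, hent⟩ := h
  subst hlen
  have hmem : ∀ j : Int, 0 ≤ j → j < (s.length : Int) → PySem.List.pyGetD s j 0 ∈ s := by
    intro j h0 h1
    exact PySem.List.pyGetD_mem s 0 ⟨by omega, by omega⟩
  have hmodmem : ∀ i : Int, 0 ≤ i → i < (s.length : Int) →
      ∀ c : Int, PySem.List.pyGetD s (PySem.Int.mod (i + c) (s.length : Int)) 0 ∈ s := by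
    intro i h0 h1 c
    have hpos : (0 : Int) < (s.length : Int) := by omega
    rw [PySem.Int.mod_eq_emod_of_pos hpos]
    exact hmem _ (Int.emod_nonneg _ (by omega)) (Int.emod_lt_of_pos _ hpos)
  rcases hr with rfl | rfl | rfl | rfl <;>
  · refine ⟨by simp [pvBitStep, PySem.List.length_pyRange_one], ?_⟩
    intro x hx
    simp only [pvBitStep, String.reduceEq, reduceIte] at hx
    rw [List.mem_map] at hx
    obtain ⟨i, hi, rfl⟩ := hx
    rw [PySem.List.mem_pyRange_one] at hi
    first
    | exact pvBxor_E _ _ (hent _ (by simpa using hmodmem i hi.1 hi.2 (-1)))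
        (hent _ (hmodmem i hi.1 hi.2 1))
    | exact pvBxor_E _ _
        (pvBxor_E _ _ (hent _ (by simpa using hmodmem i hi.1 hi.2 (-1)))
          (hent _ (hmem i hi.1 hi.2)))
        (hent _ (hmodmem i hi.1 hi.2 1))
    | exact pvBand_E _ _ (hent _ (by simpa using hmodmem i hi.1 hi.2 (-1)))
        (hent _ (hmodmem i hi.1 hi.2 1))
    | exact pvBor_E _ _ (hent _ (by simpa using hmodmem i hi.1 hi.2 (-1)))
        (hent _ (hmodmem i hi.1 hi.2 1))

theorem pvSeq_good (bits : List Int) (rule : String)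
    (hr : rule = "xor" ∨ rule = "xor3" ∨ rule = "and" ∨ rule = "or")
    (hb : ∀ x ∈ bits, pvE x) (t : Nat) :
    pvGood bits.length (pvSeq bits rule t) := by
  induction t with
  | zero => exact ⟨rfl, hb⟩
  | succ t ih => rw [pvSeq_succ]; exact pvBitStep_good _ _ _ hr ih

-- base-2^33 encoding of a window state, for the pigeonhole argument
def pvEnc : List Int → Nat
  | [] => 0
  | b :: r => (b + 2 ^ 32).toNat + 2 ^ 33 * pvEnc r

theorem pvEnc_lt (s : List Int) (h : ∀ x ∈ s, pvE x) : pvEnc s < (2 ^ 33) ^ s.length := by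
  induction s with
  | nil => simp [pvEnc]
  | cons b r ih =>
    have hb := h b (by simp)
    have hr := ih (fun x hx => h x (by simp [hx]))
    obtain ⟨hb1, hb2⟩ := hb
    have h1 : (b + 2 ^ 32).toNat < 2 ^ 33 := by omega
    calc pvEnc (b :: r) = (b + 2 ^ 32).toNat + 2 ^ 33 * pvEnc r := rfl
      _ < 2 ^ 33 + 2 ^ 33 * pvEnc r := by omega
      _ = 2 ^ 33 * (pvEnc r + 1) := by ring
      _ ≤ 2 ^ 33 * (2 ^ 33) ^ r.length := by
          exact Nat.mul_le_mul_left _ (by omega)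
      _ = (2 ^ 33) ^ (b :: r).length := by
          rw [List.length_cons, pow_succ]; ring

theorem pvEnc_inj (s : List Int) : ∀ t : List Int, (∀ x ∈ s, pvE x) →
    (∀ x ∈ t, pvE x) → s.length = t.length → pvEnc s = pvEnc t → s = t := by
  induction s with
  | nil => intro t _ _ hlen _; cases t <;> simp_all
  | cons b r ih =>
    intro t hs ht hlen henc
    cases t with
    | nil => simp at hlen
    | cons c q =>
      obtain ⟨hb1, hb2⟩ := hs b (by simp)
      obtain ⟨hc1, hc2⟩ := ht c (by simp)
      have hbn : (b + 2 ^ 32).toNat < 2 ^ 33 := by omega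
      have hcn : (c + 2 ^ 32).toNat < 2 ^ 33 := by omega
      have henc' : (b + 2 ^ 32).toNat + 2 ^ 33 * pvEnc r
          = (c + 2 ^ 32).toNat + 2 ^ 33 * pvEnc q := henc
      have h1 : b = c ∧ pvEnc r = pvEnc q := by constructor <;> omega
      have := ih q (fun x hx => hs x (by simp [hx])) (fun x hx => ht x (by simp [hx]))
        (by simpa using hlen) h1.2
      rw [h1.1, this]

-- the orbit structure: a transient mu, a period lam ≥ 1, injectivity before mu+lam, and the wrap
theorem pvOrbit (bits : List Int) (rule : String)
    (hr : rule = "xor" ∨ rule = "xor3" ∨ rule = "and" ∨ rule = "or")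
    (hb : ∀ x ∈ bits, pvE x) :
    ∃ mu lam : Nat, 0 < lam ∧ mu + lam ≤ (2 ^ 33) ^ bits.length ∧
      (∀ s t : Nat, s < t → t < mu + lam → pvSeq bits rule s ≠ pvSeq bits rule t) ∧
      pvSeq bits rule (mu + lam) = pvSeq bits rule mu := by
  have hgood := pvSeq_good bits rule hr hb
  obtain ⟨a, b, hab, heq⟩ := Fintype.exists_ne_map_eq_of_card_lt
    (fun i : Fin ((2 ^ 33) ^ bits.length + 1) =>
      (⟨pvEnc (pvSeq bits rule i.val), by
        have h := hgood i.val
        calc pvEnc (pvSeq bits rule i.val) < (2 ^ 33) ^ (pvSeq bits rule i.val).length :=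
              pvEnc_lt _ h.2
          _ = (2 ^ 33) ^ bits.length := by rw [h.1]⟩ : Fin ((2 ^ 33) ^ bits.length)))
    (by simp)
  have hseq : pvSeq bits rule a.val = pvSeq bits rule b.val :=
    pvEnc_inj _ _ (hgood a.val).2 (hgood b.val).2
      ((hgood a.val).1.trans (hgood b.val).1.symm) (by simpa using congrArg Fin.val heq)
  have hne : a.val ≠ b.val := fun h => hab (Fin.val_injective h)
  have hex : ∃ t, ∃ s, s < t ∧ pvSeq bits rule s = pvSeq bits rule t := by
    rcases Nat.lt_or_ge a.val b.val with h | h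
    · exact ⟨b.val, a.val, h, hseq⟩
    · exact ⟨a.val, b.val, by omega, hseq.symm⟩
  obtain ⟨mu, hmuT, hmueq⟩ := Nat.find_spec hex
  have hTle : Nat.find hex ≤ (2 ^ 33) ^ bits.length := by
    rcases Nat.lt_or_ge a.val b.val with h | h
    · exact le_trans (Nat.find_min' hex ⟨a.val, h, hseq⟩) (by omega)
    · exact le_trans (Nat.find_min' hex ⟨b.val, by omega, hseq.symm⟩) (by omega)
  refine ⟨mu, Nat.find hex - mu, by omega, by omega, ?_, ?_⟩
  · intro s t hst ht hst'
    have := Nat.find_min' hex ⟨s, hst, hst'⟩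
    omega
  · rw [show mu + (Nat.find hex - mu) = Nat.find hex by omega]
    exact hmueq.symm

-- one full period forward is the identity, from mu on
theorem pvSeq_shift (bits : List Int) (rule : String) (mu lam : Nat)
    (hper : pvSeq bits rule (mu + lam) = pvSeq bits rule mu) :
    ∀ k t : Nat, mu ≤ t → pvSeq bits rule (t + k * lam) = pvSeq bits rule t := by
  have hone : ∀ d : Nat, pvSeq bits rule (mu + d + lam) = pvSeq bits rule (mu + d) := by
    intro d
    induction d with
    | zero => simpa using hper
    | succ d ih =>
      have h1 : mu + (d + 1) + lam = (mu + d + lam) + 1 := by omega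
      rw [h1, pvSeq_succ, ih, ← pvSeq_succ]
      rfl
  intro k t ht
  obtain ⟨d, rfl⟩ : ∃ d, t = mu + d := ⟨t - mu, by omega⟩
  induction k with
  | zero => simp
  | succ k ih =>
    calc pvSeq bits rule (mu + d + (k + 1) * lam)
        = pvSeq bits rule (mu + (d + k * lam) + lam) := by ring_nf
      _ = pvSeq bits rule (mu + (d + k * lam)) := hone _
      _ = pvSeq bits rule (mu + d + k * lam) := by ring_nf
      _ = pvSeq bits rule (mu + d) := ih

-- the central characterisation: when do two points of the orbit coincide
theorem pvSeq_eq_iff (bits : List Int) (rule : String) (mu lam : Nat) (hlam : 0 < lam)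
    (hinj : ∀ s t : Nat, s < t → t < mu + lam → pvSeq bits rule s ≠ pvSeq bits rule t)
    (hper : pvSeq bits rule (mu + lam) = pvSeq bits rule mu)
    (a b : Nat) (hab : a ≤ b) :
    pvSeq bits rule a = pvSeq bits rule b ↔ (a = b ∨ (mu ≤ a ∧ lam ∣ (b - a))) := by
  have hred : ∀ t : Nat, mu ≤ t → pvSeq bits rule t = pvSeq bits rule (mu + (t - mu) % lam) := by
    intro t ht
    have hdm : (t - mu) / lam * lam + (t - mu) % lam = t - mu := Nat.div_add_mod' _ _
    have hidx : t = (mu + (t - mu) % lam) + ((t - mu) / lam) * lam := by omega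
    calc pvSeq bits rule t
        = pvSeq bits rule ((mu + (t - mu) % lam) + ((t - mu) / lam) * lam) := by rw [← hidx]
      _ = pvSeq bits rule (mu + (t - mu) % lam) :=
          pvSeq_shift bits rule mu lam hper _ _ (by omega)
  constructor
  · intro heq
    rcases Nat.eq_or_lt_of_le hab with rfl | hlt
    · exact Or.inl rfl
    right
    have hmua : mu ≤ a := by
      by_contra hma
      push Not at hma
      rcases Nat.lt_or_ge b (mu + lam) with hbT | hbT
      · exact absurd heq (hinj a b hlt hbT)
      · have hmb : mu ≤ b := by omega
        have h1 := hred b hmb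
        have hr2 : (b - mu) % lam < lam := Nat.mod_lt _ hlam
        exact absurd (heq.trans h1) (hinj a _ (by omega) (by omega))
    have hmub : mu ≤ b := le_trans hmua hab
    have ha' := hred a hmua
    have hb' := hred b hmub
    have hra : (a - mu) % lam < lam := Nat.mod_lt _ hlam
    have hrb : (b - mu) % lam < lam := Nat.mod_lt _ hlam
    have heq' : pvSeq bits rule (mu + (a - mu) % lam) = pvSeq bits rule (mu + (b - mu) % lam) :=
      ha'.symm.trans (heq.trans hb')
    have hmm : (a - mu) % lam = (b - mu) % lam := by
      by_contra hne
      rcases Nat.lt_or_ge ((a - mu) % lam) ((b - mu) % lam) with h | h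
      · exact absurd heq' (hinj _ _ (by omega) (by omega))
      · exact absurd heq'.symm (hinj _ _ (by omega) (by omega))
    refine ⟨hmua, ?_⟩

    have hdm1 : (a - mu) / lam * lam + (a - mu) % lam = a - mu := Nat.div_add_mod' _ _
    have hdm2 : (b - mu) / lam * lam + (b - mu) % lam = b - mu := Nat.div_add_mod' _ _
    have hqle : (a - mu) / lam * lam ≤ (b - mu) / lam * lam := by omega
    have hq : (b - mu) / lam * lam - (a - mu) / lam * lam
        = ((b - mu) / lam - (a - mu) / lam) * lam := by
      rw [Nat.sub_mul]
    have : b - a = ((b - mu) / lam - (a - mu) / lam) * lam := by omega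
    exact ⟨_, by rw [this, mul_comm]⟩
  · rintro (rfl | ⟨hmua, k, hk⟩)
    · rfl
    have hb : b = a + k * lam := by rw [mul_comm] at hk; omega
    rw [hb]
    exact (pvSeq_shift bits rule mu lam hper k a hmua).symm


-- A's dictionary loop returns (mu, lam)
theorem pvLoopA_run (bits : List Int) (rule : String) (mu lam : Nat) (hlam : 0 < lam)
    (hinj : ∀ s t : Nat, s < t → t < mu + lam → pvSeq bits rule s ≠ pvSeq bits rule t)
    (hper : pvSeq bits rule (mu + lam) = pvSeq bits rule mu) :
    ∀ (fuel t : Nat) (seen : PySem.Dict (List Int) Int),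
      t ≤ mu + lam → mu + lam - t < fuel →
      (∀ s : Nat, s < t → seen.get? (pvSeq bits rule s) = some (s : Int)) →
      (∀ k : List Int, (∀ s : Nat, s < t → pvSeq bits rule s ≠ k) → seen.get? k = none) →
      pvLoopA rule fuel seen (pvSeq bits rule t) (t : Int) = ((mu : Int), (lam : Int)) := by
  intro fuel
  induction fuel with
  | zero => intro t seen h1 h2 _ _; omega
  | succ fuel ih =>
    intro t seen h1 h2 hsome hnone
    by_cases hT : t = mu + lam
    · subst hT
      have hkey : seen.get? (pvSeq bits rule (mu + lam)) = some (mu : Int) := by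
        rw [hper]; exact hsome mu (by omega)
      simp only [pvLoopA, hkey]
      refine Prod.ext ?_ (by push_cast; ring)
      rfl
    · have htlt : t < mu + lam := by omega
      have hkey : seen.get? (pvSeq bits rule t) = none := by
        apply hnone; intro s hs heq; exact hinj s t hs htlt heq
      simp only [pvLoopA, hkey]
      rw [← pvSeq_succ, show (t : Int) + 1 = ((t + 1 : Nat) : Int) by push_cast; ring]
      apply ih (t + 1) _ (by omega) (by omega)
      · intro s hs
        by_cases hst : s = t
        · subst hst; exact PySem.Dict.get?_insert_self _ _ _
        · rw [PySem.Dict.get?_insert]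
          rw [if_neg (fun h => hinj s t (by omega) htlt h)]
          exact hsome s (by omega)
      · intro k hk
        rw [PySem.Dict.get?_insert]
        rw [if_neg (fun h => hk t (by omega) h.symm)]
        exact hnone k (fun s hs => hk s (by omega))

-- Floyd phase 1 finds the first meeting point seq m
theorem pvLoop1_run (bits : List Int) (rule : String) (m : Nat)
    (hmeq : pvSeq bits rule m = pvSeq bits rule (2 * m))
    (hmin : ∀ i : Nat, 0 < i → i < m → pvSeq bits rule i ≠ pvSeq bits rule (2 * i)) :
    ∀ (fuel i : Nat), 0 < i → i ≤ m → m - i < fuel →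
      pvLoop1 rule fuel (pvSeq bits rule i) (pvSeq bits rule (2 * i)) = pvSeq bits rule m := by
  intro fuel
  induction fuel with
  | zero => intro i _ _ _; omega
  | succ fuel ih =>
    intro i hi0 him hfuel
    by_cases hi : i = m
    · subst hi
      simp only [pvLoop1]
      rw [if_pos hmeq]
      exact hmeq.symm
    · simp only [pvLoop1]
      rw [if_neg (hmin i hi0 (by omega))]
      rw [← pvSeq_succ, ← pvSeq_succ, ← pvSeq_succ,
        show 2 * i + 1 + 1 = 2 * (i + 1) by ring]
      exact ih (i + 1) (by omega) (by omega) (by omega)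

-- Floyd phase 2 returns the transient mu together with seq mu
theorem pvLoop2_run (bits : List Int) (rule : String) (mu lam : Nat) (hlam : 0 < lam)
    (hinj : ∀ s t : Nat, s < t → t < mu + lam → pvSeq bits rule s ≠ pvSeq bits rule t)
    (hper : pvSeq bits rule (mu + lam) = pvSeq bits rule mu)
    (m : Nat) (hm0 : 0 < m) (hdvd : lam ∣ m) :
    ∀ (fuel j : Nat), j ≤ mu → mu - j < fuel →
      pvLoop2 rule fuel (pvSeq bits rule j) (pvSeq bits rule (m + j)) (j : Int)
        = ((mu : Int), pvSeq bits rule mu) := by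
  intro fuel
  induction fuel with
  | zero => intro j _ _; omega
  | succ fuel ih =>
    intro j hj hfuel
    by_cases hjmu : j = mu
    · rw [hjmu]
      have heq : pvSeq bits rule mu = pvSeq bits rule (m + mu) := by
        rw [pvSeq_eq_iff bits rule mu lam hlam hinj hper mu (m + mu) (by omega)]
        exact Or.inr ⟨le_refl mu, by rw [show m + mu - mu = m by omega]; exact hdvd⟩
      simp only [pvLoop2]
      rw [if_pos heq]
    · have hjlt : j < mu := by omega
      have hne : pvSeq bits rule j ≠ pvSeq bits rule (m + j) := by
        intro heq
        rcases (pvSeq_eq_iff bits rule mu lam hlam hinj hper j (m + j) (by omega)).mp heq with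
          h | ⟨h, _⟩
        · omega
        · omega
      simp only [pvLoop2]
      rw [if_neg hne]
      rw [← pvSeq_succ, ← pvSeq_succ, show (j : Int) + 1 = ((j + 1 : Nat) : Int) by push_cast; ring]
      exact ih (j + 1) (by omega) (by omega)

-- Floyd phase 3 walks once around the cycle: returns lam
theorem pvLoop3_run (bits : List Int) (rule : String) (mu lam : Nat) (hlam : 0 < lam)
    (hinj : ∀ s t : Nat, s < t → t < mu + lam → pvSeq bits rule s ≠ pvSeq bits rule t)
    (hper : pvSeq bits rule (mu + lam) = pvSeq bits rule mu) :
    ∀ (fuel k : Nat), 1 ≤ k → k ≤ lam → lam - k < fuel →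
      pvLoop3 rule (pvSeq bits rule mu) fuel (pvSeq bits rule (mu + k)) (k : Int) = (lam : Int) := by
  intro fuel
  induction fuel with
  | zero => intro k _ _ _; omega
  | succ fuel ih =>
    intro k hk1 hklam hfuel
    by_cases hk : k = lam
    · subst hk
      simp only [pvLoop3]
      rw [if_pos hper]
    · have hne : pvSeq bits rule (mu + k) ≠ pvSeq bits rule mu := by
        intro heq
        rcases (pvSeq_eq_iff bits rule mu lam hlam hinj hper mu (mu + k) (by omega)).mp heq.symm
          with h | ⟨_, hd⟩
        · omega
        · rw [show mu + k - mu = k by omega] at hd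
          have := Nat.le_of_dvd (by omega) hd
          omega
      simp only [pvLoop3]
      rw [if_neg hne]
      rw [← pvSeq_succ, show (k : Int) + 1 = ((k + 1 : Nat) : Int) by push_cast; ring,
        show mu + k + 1 = mu + (k + 1) by omega]
      exact ih (k + 1) (by omega) (by omega) (by omega)

-- ===== VERDICT (by name: the statement is the Claim_ definition above) =====
theorem find_bit_orbit_py_spec : Claim_equal_find_bit_orbit_py := by
  intro bits rule hdom hr
  have hb : ∀ x ∈ bits, pvE x := by
    intro x hx
    have := hdom
    simp only [Dom_find_bit_orbit_py, Bool.and_eq_true, List.all_eq_true] at this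
    have h2 := this.1 x hx
    simp only [pvDomInt, decide_eq_true_eq] at h2
    constructor <;> [norm_num; norm_num] <;> omega
  obtain ⟨mu, lam, hlam, hle, hinj, hper⟩ := pvOrbit bits rule hr hb
  unfold Spec_find_bit_orbit_py
  -- the first tortoise/hare meeting index m
  have hdm : lam * (mu / lam) + mu % lam = mu := Nat.div_add_mod mu lam
  have hmod : mu % lam < lam := Nat.mod_lt _ hlam
  have hsucc : lam * (mu / lam + 1) = lam * (mu / lam) + lam := Nat.mul_succ _ _
  have hi0gt : mu < lam * (mu / lam + 1) := by omega
  have hi0le : lam * (mu / lam + 1) ≤ mu + lam := by omega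
  have hi0eq : pvSeq bits rule (lam * (mu / lam + 1))
      = pvSeq bits rule (2 * (lam * (mu / lam + 1))) := by
    rw [pvSeq_eq_iff bits rule mu lam hlam hinj hper _ _ (by omega)]
    refine Or.inr ⟨by omega, ?_⟩
    rw [show 2 * (lam * (mu / lam + 1)) - lam * (mu / lam + 1) = lam * (mu / lam + 1) by omega]
    exact ⟨mu / lam + 1, rfl⟩
  have hm_ex : ∃ i : Nat, 0 < i ∧ pvSeq bits rule i = pvSeq bits rule (2 * i) :=
    ⟨lam * (mu / lam + 1), by omega, hi0eq⟩
  obtain ⟨hm0, hmeq⟩ := Nat.find_spec hm_ex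
  have hmin : ∀ i : Nat, 0 < i → i < Nat.find hm_ex →
      pvSeq bits rule i ≠ pvSeq bits rule (2 * i) :=
    fun i h0 him heq => (Nat.find_min hm_ex him) ⟨h0, heq⟩
  have hmle : Nat.find hm_ex ≤ mu + lam :=
    le_trans (Nat.find_min' hm_ex ⟨by omega, hi0eq⟩) hi0le
  have hmprops : mu ≤ Nat.find hm_ex ∧ lam ∣ Nat.find hm_ex := by
    have h := (pvSeq_eq_iff bits rule mu lam hlam hinj hper
      (Nat.find hm_ex) (2 * Nat.find hm_ex) (by omega)).mp hmeq
    rcases h with h | ⟨h1, h2⟩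
    · omega
    · rw [show 2 * Nat.find hm_ex - Nat.find hm_ex = Nat.find hm_ex by omega] at h2
      exact ⟨h1, h2⟩
  -- side A
  have hA : find_bit_orbit_py bits rule = ((mu : Int), (lam : Int)) := by
    unfold find_bit_orbit_py
    have h := pvLoopA_run bits rule mu lam hlam hinj hper ((2 ^ 33) ^ bits.length + 1) 0
      PySem.Dict.empty (by omega) (by omega) (by intro s hs; omega)
      (by intro k _; exact PySem.Dict.get?_empty _)
    simpa using h
  -- side B
  have hL1 : pvLoop1 rule ((2 ^ 33) ^ bits.length + 1) (pvSeq bits rule 1) (pvSeq bits rule 2)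
      = pvSeq bits rule (Nat.find hm_ex) := by
    have h := pvLoop1_run bits rule (Nat.find hm_ex) hmeq hmin ((2 ^ 33) ^ bits.length + 1) 1
      (by omega) (by omega) (by omega)
    simpa using h
  have hL2 : pvLoop2 rule ((2 ^ 33) ^ bits.length + 1) bits (pvSeq bits rule (Nat.find hm_ex)) 0
      = ((mu : Int), pvSeq bits rule mu) := by
    have h := pvLoop2_run bits rule mu lam hlam hinj hper (Nat.find hm_ex) (by omega)
      hmprops.2 ((2 ^ 33) ^ bits.length + 1) 0 (by omega) (by omega)
    simpa using h
  have hL3 : pvLoop3 rule (pvSeq bits rule mu) ((2 ^ 33) ^ bits.length + 1)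
      (pvBitStep (pvSeq bits rule mu) rule) 1 = (lam : Int) := by
    have h := pvLoop3_run bits rule mu lam hlam hinj hper ((2 ^ 33) ^ bits.length + 1) 1
      (by omega) (by omega) (by omega)
    rw [pvSeq_succ bits rule mu] at h
    simpa using h
  have hB : find_bit_orbit_py_alt bits rule = ((mu : Int), (lam : Int)) := by
    show ((pvLoop2 rule ((2 ^ 33) ^ bits.length + 1) bits
        (pvLoop1 rule ((2 ^ 33) ^ bits.length + 1) (pvBitStep bits rule)
          (pvBitStep (pvBitStep bits rule) rule)) 0).1,
      pvLoop3 rule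
        (pvLoop2 rule ((2 ^ 33) ^ bits.length + 1) bits
          (pvLoop1 rule ((2 ^ 33) ^ bits.length + 1) (pvBitStep bits rule)
            (pvBitStep (pvBitStep bits rule) rule)) 0).2
        ((2 ^ 33) ^ bits.length + 1)
        (pvBitStep
          (pvLoop2 rule ((2 ^ 33) ^ bits.length + 1) bits
            (pvLoop1 rule ((2 ^ 33) ^ bits.length + 1) (pvBitStep bits rule)
              (pvBitStep (pvBitStep bits rule) rule)) 0).2 rule) 1) = ((mu : Int), (lam : Int))
    rw [show pvBitStep bits rule = pvSeq bits rule 1 from (pvSeq_succ bits rule 0).symm]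
    rw [show pvBitStep (pvSeq bits rule 1) rule = pvSeq bits rule 2 from (pvSeq_succ bits rule 1).symm]
    rw [hL1, hL2]
    show ((mu : Int), pvLoop3 rule (pvSeq bits rule mu) ((2 ^ 33) ^ bits.length + 1)
      (pvBitStep (pvSeq bits rule mu) rule) 1) = ((mu : Int), (lam : Int))
    rw [hL3]
  rw [hA, hB]
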